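-- pv_equiv track=rewrite | github.com/jiruifu-jerry0219/UpperLimbEstimator | data_process/feature_extraction.py | getZC
-- ===== SOURCE A (Python) =====
-- def getZC(rawEMGSignal, threshold):
--     """ How many times does the signal crosses the 0 (+-threshold).::
--
--             ZC = sum([sgn(x[i] X x[i+1]) intersecated |x[i] - x[i+1]| >= threshold]) for i = 1 --> N - 1
--             sign(x) = {
--                         1, if x >= threshold
--                         0, otherwise
--                     }
--
--         * Input:
--             * rawEMGSignal = EMG signal as list
--             * threshold = threshold to use in order to avoid fluctuations caused by noise and low voltage fluctuations
--         * Output: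
--             * ZC index
--
--         :param rawEMGSignal: the raw EMG signal
--         :type rawEMGSignal: list
--         :param threshold: value to sum / substract to the zero when evaluating the crossing.
--         :type threshold: int
--         :return: Number of times the signal crosses the 0 (+- threshold)
--         :rtype: float
--     """
--     positive = (rawEMGSignal[0] > threshold)
--     ZC = 0
--     for x in rawEMGSignal[1:]:
--         if (positive):
--             if (x < 0 - threshold):
--                 positive = False
--                 ZC += 1
--         else:
--             if (x > 0 + threshold):
--                 positive = True
--                 ZC += 1
--     return (ZC)
-- ===== SOURCE B (Python) =====
-- def getZC(rawEMGSignal, threshold):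
--     # Two-pass decomposition: first reduce the signal to the sequence of
--     # supra-threshold states (True above +threshold, False below -threshold,
--     # deadband samples dropped), then count adjacent state changes.
--     states = [rawEMGSignal[0] > threshold]
--     for x in rawEMGSignal[1:]:
--         if x > threshold:
--             states.append(True)
--         elif x < -threshold:
--             states.append(False)
--     return sum(1 for a, b in zip(states, states[1:]) if a != b)
-- ===== Notes on version B (the rewrite author's own statement) =====
-- stated objective: alternative
-- what changed: Replaces A's single stateful hysteresis loop by two passes: filter the signal down to the list of supra-threshold boolean states, then count adjacent unequal state pairs with zip.
-- outside the precondition, e.g. on getZC([], 0): A raises IndexError, B raises IndexError; on getZC([1, 0], -5): A returns 1, B returns 0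
import Mathlib
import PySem

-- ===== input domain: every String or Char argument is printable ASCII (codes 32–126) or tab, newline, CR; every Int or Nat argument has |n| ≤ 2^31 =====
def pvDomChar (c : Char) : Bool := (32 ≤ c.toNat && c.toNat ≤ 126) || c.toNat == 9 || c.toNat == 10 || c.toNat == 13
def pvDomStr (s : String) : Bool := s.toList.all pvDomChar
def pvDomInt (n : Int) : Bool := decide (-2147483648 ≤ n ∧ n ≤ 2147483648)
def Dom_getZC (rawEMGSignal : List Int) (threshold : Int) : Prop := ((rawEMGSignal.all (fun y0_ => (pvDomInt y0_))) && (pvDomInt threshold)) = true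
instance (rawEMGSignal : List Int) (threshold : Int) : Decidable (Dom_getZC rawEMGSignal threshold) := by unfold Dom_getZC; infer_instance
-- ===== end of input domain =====

-- B replaces A's single stateful hysteresis loop by two passes (filter supra-threshold
-- states, then count adjacent state changes); objective: alternative decomposition.

-- ===== PORT A =====
def getZC (rawEMGSignal : List Int) (threshold : Int) : Int :=
  let positive := decide (((PySem.List.pyGet? rawEMGSignal 0).getD 0) > threshold)
  ((PySem.List.slice rawEMGSignal (some 1) none).foldl
    (fun (st : Bool × Int) x =>
      if st.1 then (if x < 0 - threshold then (false, st.2 + 1) else st)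
      else (if x > 0 + threshold then (true, st.2 + 1) else st))
    (positive, 0)).2

-- ===== PORT B =====
def getZC_alt (rawEMGSignal : List Int) (threshold : Int) : Int :=
  let s0 := decide (((PySem.List.pyGet? rawEMGSignal 0).getD 0) > threshold)
  let states := s0 :: (PySem.List.slice rawEMGSignal (some 1) none).filterMap
    (fun x => if x > threshold then some true else if x < -threshold then some false else none)
  ((states.zip (states.drop 1)).countP (fun p => p.1 != p.2) : Int)

-- ===== PRECONDITION & SPEC =====
-- Pre_ excludes the empty list, on which A raises IndexError, and inputs whose tail has a
-- sample inside both hysteresis bands at once (x > threshold and x < -threshold, possible only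
-- for a negative threshold): there the two band tests conflict, no behaviour is specified, and
-- A's and B's values are both defensible orderings of the two overlapping tests.
def Pre_getZC (rawEMGSignal : List Int) (threshold : Int) : Prop :=
  rawEMGSignal ≠ [] ∧ ∀ x ∈ rawEMGSignal.tail, ¬(x > threshold ∧ x < -threshold)
instance (rawEMGSignal : List Int) (threshold : Int) : Decidable (Pre_getZC rawEMGSignal threshold) := by unfold Pre_getZC; infer_instance

def pvWitness_getZC : List Int × Int := ([5, -3, 0, 4, -4], 1)

def Spec_getZC (rawEMGSignal : List Int) (threshold : Int) (out : Int) : Prop := out = getZC_alt rawEMGSignal threshold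
instance (rawEMGSignal : List Int) (threshold : Int) (out : Int) : Decidable (Spec_getZC rawEMGSignal threshold out) := by unfold Spec_getZC; infer_instance

-- ===== CLAIM (what is proved, stated in full; the proofs are below) =====
def Claim_equal_getZC : Prop := ∀ (rawEMGSignal : List Int) (threshold : Int), Dom_getZC rawEMGSignal threshold → Pre_getZC rawEMGSignal threshold → Spec_getZC rawEMGSignal threshold (getZC rawEMGSignal threshold)

-- ===== LEMMAS AND PROOFS =====

-- Counting adjacent unequal pairs: peel the first pair off B's state sequence.
lemma zipcount_cons (a b : Bool) (L : List Bool) :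
    ((((a :: b :: L).zip (b :: L)).countP (fun p => p.1 != p.2) : Nat) : Int)
      = (if a = b then 0 else 1)
        + ((((b :: L).zip L).countP (fun p => p.1 != p.2) : Nat) : Int) := by
  cases a <;> cases b <;> simp <;> omega

-- Loop invariant: A's fold over the tail, started in state s with counter c, yields c plus
-- the number of adjacent unequal pairs in B's state sequence s :: (filtered tail).
lemma getZC_loop_eq (t : Int) : ∀ (xs : List Int),
    (∀ x ∈ xs, ¬(x > t ∧ x < -t)) → ∀ (s : Bool) (c : Int),
    (xs.foldl
      (fun (st : Bool × Int) x =>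
        if st.1 then (if x < 0 - t then (false, st.2 + 1) else st)
        else (if x > 0 + t then (true, st.2 + 1) else st))
      (s, c)).2
    = c + (((s :: xs.filterMap
          (fun x => if x > t then some true else if x < -t then some false else none)).zip
        (xs.filterMap
          (fun x => if x > t then some true else if x < -t then some false else none))).countP
        (fun p => p.1 != p.2) : Int) := by
  intro xs
  induction xs with
  | nil => intro _ s c; simp
  | cons x xs ih =>
    intro hsep s c
    have hh : ¬(x > t ∧ x < -t) := hsep x (by simp)
    have hrest : ∀ y ∈ xs, ¬(y > t ∧ y < -t) := fun y hy => hsep y (by simp [hy])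
    rw [List.foldl_cons]
    by_cases hx : x > t
    · have hx2 : ¬ (x < -t) := fun h2 => hh ⟨hx, h2⟩
      have hF : (x :: xs).filterMap
          (fun x => if x > t then some true else if x < -t then some false else none)
          = true :: xs.filterMap
            (fun x => if x > t then some true else if x < -t then some false else none) := by
        simp [hx]
      rw [hF, zipcount_cons]
      cases s with
      | true =>
        have hstep : (if ((true, c) : Bool × Int).1 then
              (if x < 0 - t then (false, ((true, c) : Bool × Int).2 + 1) else (true, c))
            else (if x > 0 + t then (true, ((true, c) : Bool × Int).2 + 1) else (true, c)))
            = ((true, c) : Bool × Int) := by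
          split_ifs <;> first | rfl | (exfalso; omega) | simp_all
        rw [hstep, ih hrest true c]
        simp
      | false =>
        have hstep : (if ((false, c) : Bool × Int).1 then
              (if x < 0 - t then (false, ((false, c) : Bool × Int).2 + 1) else (false, c))
            else (if x > 0 + t then (true, ((false, c) : Bool × Int).2 + 1) else (false, c)))
            = ((true, c + 1) : Bool × Int) := by
          split_ifs <;> first | rfl | (exfalso; omega)
        rw [hstep, ih hrest true (c + 1)]
        simp; ring
    · by_cases hx2 : x < -t
      · have hF : (x :: xs).filterMap
            (fun x => if x > t then some true else if x < -t then some false else none)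
            = false :: xs.filterMap
              (fun x => if x > t then some true else if x < -t then some false else none) := by
          simp [hx, hx2]
        rw [hF, zipcount_cons]
        cases s with
        | true =>
          have hstep : (if ((true, c) : Bool × Int).1 then
                (if x < 0 - t then (false, ((true, c) : Bool × Int).2 + 1) else (true, c))
              else (if x > 0 + t then (true, ((true, c) : Bool × Int).2 + 1) else (true, c)))
              = ((false, c + 1) : Bool × Int) := by
            split_ifs <;> first | rfl | (exfalso; omega) | simp_all
          rw [hstep, ih hrest false (c + 1)]
          simp; ring
        | false =>
          have hstep : (if ((false, c) : Bool × Int).1 then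
                (if x < 0 - t then (false, ((false, c) : Bool × Int).2 + 1) else (false, c))
              else (if x > 0 + t then (true, ((false, c) : Bool × Int).2 + 1) else (false, c)))
              = ((false, c) : Bool × Int) := by
            split_ifs <;> first | rfl | (exfalso; omega)
          rw [hstep, ih hrest false c]
          simp
      · have hF : (x :: xs).filterMap
            (fun x => if x > t then some true else if x < -t then some false else none)
            = xs.filterMap
              (fun x => if x > t then some true else if x < -t then some false else none) := by
          simp [hx, hx2]
        rw [hF]
        have hstep : (if (s, c).1 then
              (if x < 0 - t then (false, ((s, c) : Bool × Int).2 + 1) else (s, c))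
            else (if x > 0 + t then (true, ((s, c) : Bool × Int).2 + 1) else (s, c)))
            = ((s, c) : Bool × Int) := by
          cases s <;> split_ifs <;> first | rfl | (exfalso; omega)
        rw [hstep, ih hrest s c]

-- ===== VERDICT (by name: the statement is the Claim_ definition above) =====
theorem getZC_spec : Claim_equal_getZC := by
  intro l t _ hpre
  obtain ⟨hne, hsep⟩ := hpre
  cases l with
  | nil => exact absurd rfl hne
  | cons a rest =>
    unfold Spec_getZC getZC getZC_alt
    simp only [PySem.List.slice_from_one, List.tail_cons, List.drop_one]
    rw [getZC_loop_eq t rest (by simpa using hsep) _ 0]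
    simp [PySem.List.pyGet?, PySem.List.pyIdx?]
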